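-- pv_equiv track=rewrite | github.com/ericmerle3789/Collatz-Junction-Theorem | syracuse_jepa/pipeline/verify_all_k.py | monotone_compositions
-- ===== SOURCE A (Python) =====
-- def monotone_compositions(total: int, parts: int):
--     """Generate all non-decreasing sequences of length `parts` summing to `total`, each ≥ 1."""
--     results = []
--     def backtrack(remaining, min_val, current):
--         if len(current) == parts:
--             if remaining == 0:
--                 results.append(tuple(current))
--             return
--         spots_left = parts - len(current)
--         for v in range(min_val, remaining - spots_left + 2):
--             backtrack(remaining - v, v, current + [v])
--     backtrack(total, 1, [])
--     return results
-- ===== SOURCE B (Python) =====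
-- def monotone_compositions(total: int, parts: int):
--     """Generate all non-decreasing sequences of length `parts` summing to `total`, each >= 1."""
--     states = [(total, 1, ())]  # (remaining, min_val, prefix)
--     spots_left = parts
--     while spots_left > 0 and states:
--         states = [(rem - v, v, pre + (v,))
--                   for (rem, mn, pre) in states
--                   for v in range(mn, rem - spots_left + 2)]
--         spots_left -= 1
--     return [pre for (rem, _mn, pre) in states if rem == 0]
-- ===== Notes on version B (the rewrite author's own statement) =====
-- stated objective: alternative
-- what changed: Replaced the recursive mutating backtracker (shared results list, growing prefix passed down the call stack) with an iterative breadth-first layer expansion: a while loop expands a list of (remaining, min_val, prefix) states by a comprehension, stopping early when no states survive, then filters the completed states.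
import Mathlib
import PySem

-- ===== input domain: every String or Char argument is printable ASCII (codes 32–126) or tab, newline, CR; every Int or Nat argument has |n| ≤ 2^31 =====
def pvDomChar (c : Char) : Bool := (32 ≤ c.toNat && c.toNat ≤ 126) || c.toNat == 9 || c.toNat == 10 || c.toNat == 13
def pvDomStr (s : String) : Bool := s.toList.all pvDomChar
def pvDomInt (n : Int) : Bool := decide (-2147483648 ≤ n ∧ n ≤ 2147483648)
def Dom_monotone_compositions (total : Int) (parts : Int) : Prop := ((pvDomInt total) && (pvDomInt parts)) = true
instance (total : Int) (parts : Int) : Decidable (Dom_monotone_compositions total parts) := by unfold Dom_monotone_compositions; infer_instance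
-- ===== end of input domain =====

-- B replaces A's recursive mutating backtracker with an iterative breadth-first layer
-- expansion over (remaining, min_val, prefix) states (objective: alternative, same cost).

-- ===== PORT A =====
-- A's nested `backtrack(remaining, min_val, current)` appends into the shared `results`.
-- Fuel `n` is `spots_left = parts - len(current)` (nonnegative under Pre_); `n = 0` is the
-- guard `len(current) == parts`. The accumulator `results` is threaded explicitly.
def pvBtA : Nat → Int → Int → List Int → List (List Int) → List (List Int)
  | 0, remaining, _, current, results =>
      if remaining = 0 then results ++ [current] else results
  | (n+1), remaining, min_val, current, results =>
      (PySem.List.pyRange min_val (remaining - ((n : Int) + 1) + 2) 1).foldl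
        (fun res v => pvBtA n (remaining - v) v (current ++ [v]) res) results

def monotone_compositions (total : Int) (parts : Int) : List (List Int) :=
  pvBtA parts.toNat total 1 [] []

-- ===== PORT B =====
-- Source B's loop body: one comprehension expanding every state by all admissible next values.
def pvStep (spots_left : Int) (states : List (Int × Int × List Int)) :
    List (Int × Int × List Int) :=
  states.flatMap (fun s =>
    (PySem.List.pyRange s.2.1 (s.1 - spots_left + 2) 1).map
      (fun v => (s.1 - v, v, s.2.2 ++ [v])))

-- Source B's `while spots_left > 0 and states:` loop; fuel n is the current spots_left
-- (the loop exits as soon as states is empty or spots_left reaches 0).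
def pvLoop : Nat → List (Int × Int × List Int) → List (Int × Int × List Int)
  | 0, states => states
  | (n+1), states =>
      if states = [] then states else pvLoop n (pvStep ((n : Int) + 1) states)

def monotone_compositions_alt (total : Int) (parts : Int) : List (List Int) :=
  let states := pvLoop parts.toNat [(total, 1, [])]
  (states.filter (fun s => s.1 == 0)).map (fun s => s.2.2)

-- ===== PRECONDITION & SPEC =====
-- When parts < 0 and total ≥ parts the first range is nonempty and A's recursion never
-- reaches `len(current) == parts`, so it raises RecursionError; Pre_ excludes exactly that.
def Pre_monotone_compositions (total : Int) (parts : Int) : Prop := 0 ≤ parts ∨ total < parts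
instance (total : Int) (parts : Int) : Decidable (Pre_monotone_compositions total parts) := by unfold Pre_monotone_compositions; infer_instance
def pvWitness_monotone_compositions : Int × Int := (6, 3)

def Spec_monotone_compositions (total : Int) (parts : Int) (out : List (List Int)) : Prop := out = monotone_compositions_alt total parts
instance (total : Int) (parts : Int) (out : List (List Int)) : Decidable (Spec_monotone_compositions total parts out) := by unfold Spec_monotone_compositions; infer_instance

-- ===== CLAIM (what is proved, stated in full; the proofs are below) =====
def Claim_equal_monotone_compositions : Prop := ∀ (total : Int) (parts : Int), Dom_monotone_compositions total parts → Pre_monotone_compositions total parts → Spec_monotone_compositions total parts (monotone_compositions total parts)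

-- ===== LEMMAS AND PROOFS =====

-- Proof helper (not part of either port): the pure list of completed tails.
def pvT : Nat → Int → Int → List (List Int)
  | 0, remaining, _ => if remaining = 0 then [[]] else []
  | (n+1), remaining, min_val =>
      (PySem.List.pyRange min_val (remaining - ((n : Int) + 1) + 2) 1).flatMap
        (fun v => (pvT n (remaining - v) v).map (fun tail => v :: tail))

-- A's accumulator-passing backtracker appends exactly the tails pvT returns, prefixed.
theorem pvBtA_eq_pvT (n : Nat) : ∀ (remaining min_val : Int) (current : List Int)
    (results : List (List Int)),
    pvBtA n remaining min_val current results
      = results ++ (pvT n remaining min_val).map (fun t => current ++ t) := by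
  induction n with
  | zero =>
      intro remaining min_val current results
      simp only [pvBtA, pvT]
      split <;> simp
  | succ n ih =>
      intro remaining min_val current results
      simp only [pvBtA, pvT]
      have hc := PySem.List.foldl_congr_mem
        (l := PySem.List.pyRange min_val (remaining - ((n : Int) + 1) + 2) 1)
        (init := results)
        (f := fun res v => pvBtA n (remaining - v) v (current ++ [v]) res)
        (g := fun res v => res ++ (pvT n (remaining - v) v).map
                (fun t => current ++ v :: t))
        (by intro res v _
            simp only [ih]
            simp)
      rw [hc, PySem.List.foldl_append_eq_flatMap]
      simp [List.map_flatMap, List.map_map, Function.comp_def]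

-- B's layered expansion, run for n layers, yields pvT's tails prefixed with each state's prefix.
theorem pvFold_eq_pvT (n : Nat) : ∀ (states : List (Int × Int × List Int)),
    (((pvLoop n states).filter
          (fun s => s.1 == 0)).map (fun s => s.2.2))
      = states.flatMap (fun s => (pvT n s.1 s.2.1).map (fun t => s.2.2 ++ t)) := by
  induction n with
  | zero =>
      intro states
      simp only [pvLoop, pvT]
      induction states with
      | nil => simp
      | cons s ss ihs =>
          simp only [List.flatMap_cons, List.filter_cons]
          split <;> rename_i h
          · have : s.1 = 0 := by simpa using h
            simp [this, ihs]
          · have : ¬ s.1 = 0 := by simpa using h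
            simp [this, ihs]
  | succ n ih =>
      intro states
      simp only [pvLoop]
      by_cases hnil : states = []
      · simp [hnil]
      rw [if_neg hnil, ih]
      unfold pvStep
      rw [List.flatMap_assoc]
      congr 1
      funext s
      rw [List.flatMap_map]
      simp only [pvT]
      simp [List.map_flatMap, List.map_map, Function.comp_def]

-- ===== VERDICT (by name: the statement is the Claim_ definition above) =====
theorem monotone_compositions_spec : Claim_equal_monotone_compositions := by
  intro total parts _ hpre
  unfold Spec_monotone_compositions monotone_compositions monotone_compositions_alt
  by_cases hp : 0 ≤ parts
  · rw [pvBtA_eq_pvT, pvFold_eq_pvT]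
    simp
  · -- parts < 0: the loop never runs (parts.toNat = 0), and Pre_ gives total < parts < 0
    have htot : total ≠ 0 := by
      rcases hpre with h | h
      · omega
      · omega
    have hz : parts.toNat = 0 := by omega
    rw [hz]
    simp [pvBtA, pvLoop, htot]
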